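-- pv_equiv track=rewrite | github.com/okamitsu320/RTLens | rtlens/rtlens/netlistsvg_view.py | _yosys_quote_arg
-- ===== SOURCE A (Python) =====
-- def _yosys_quote_arg(arg: str) -> str:
--     text = str(arg or "")
--     if not text:
--         return '""'
--     if not any(ch in text for ch in (' ', '\t', '\n', '\r', ';', '"', "'")):
--         return text
--     escaped = text.replace("\\", "\\\\").replace('"', '\\"')
--     return f'"{escaped}"'
-- ===== SOURCE B (Python) =====
-- def _yosys_quote_arg(arg: str) -> str:
--     text = str(arg or "")
--     if not text:
--         return '""'
--     special = False
--     out = []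
--     for ch in text:
--         if ch in ' \t\n\r;"\'':
--             special = True
--         if ch == '\\':
--             out.append('\\\\')
--         elif ch == '"':
--             out.append('\\"')
--         else:
--             out.append(ch)
--     if not special:
--         return text
--     return '"' + ''.join(out) + '"'
-- ===== Notes on version B (the rewrite author's own statement) =====
-- stated objective: alternative
-- what changed: Replaces the any(...) membership scan plus two .replace passes (up to three traversals) with a single fused loop that builds the escaped pieces and a trigger flag in one pass over the string.
import Mathlib
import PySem

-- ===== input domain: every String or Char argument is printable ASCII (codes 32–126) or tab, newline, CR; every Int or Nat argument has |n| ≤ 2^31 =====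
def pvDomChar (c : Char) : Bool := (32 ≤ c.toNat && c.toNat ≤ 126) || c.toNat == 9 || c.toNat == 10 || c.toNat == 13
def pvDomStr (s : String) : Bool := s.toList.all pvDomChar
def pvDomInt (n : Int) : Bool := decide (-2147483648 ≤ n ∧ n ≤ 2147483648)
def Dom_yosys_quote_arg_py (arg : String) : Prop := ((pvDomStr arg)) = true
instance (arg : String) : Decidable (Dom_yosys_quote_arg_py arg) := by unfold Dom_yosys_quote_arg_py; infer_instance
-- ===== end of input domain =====

-- B fuses A's any(...) scan and two .replace passes into one loop; same cost, different decomposition.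

-- ===== PORT A =====
-- str(arg or "") is arg itself when non-empty, "" otherwise: identical to arg as a string value.
def yosys_quote_arg_py (arg : String) : String :=
  let text := arg
  if PySem.Str.len text == 0 then "\"\""
  else if !([' ', '\t', '\n', '\r', ';', '"', '\''].any
              (fun ch => PySem.Chars.isIn [ch] text.toList)) then text
  else
    let escaped := PySem.Chars.replace (PySem.Chars.replace text.toList ['\\'] ['\\', '\\'])
                     ['"'] ['\\', '"']
    String.ofList ('"' :: escaped ++ ['"'])

-- ===== PORT B =====
def pvTrig : List Char := [' ', '\t', '\n', '\r', ';', '"', '\'']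

def pvPiece (ch : Char) : List Char :=
  if ch = '\\' then ['\\', '\\'] else if ch = '"' then ['\\', '"'] else [ch]

def yosys_quote_arg_py_alt (arg : String) : String :=
  let text := arg
  if PySem.Str.len text == 0 then "\"\""
  else
    let st := text.toList.foldl
      (fun (st : Bool × List (List Char)) ch =>
        (st.1 || decide (ch ∈ pvTrig), st.2 ++ [pvPiece ch]))
      (false, [])
    if st.1 = false then text
    else String.ofList ('"' :: PySem.Chars.join [] st.2 ++ ['"'])

-- ===== PRECONDITION & SPEC =====
def Spec_yosys_quote_arg_py (arg : String) (out : String) : Prop := out = yosys_quote_arg_py_alt arg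
instance (arg : String) (out : String) : Decidable (Spec_yosys_quote_arg_py arg out) := by unfold Spec_yosys_quote_arg_py; infer_instance

-- ===== CLAIM (what is proved, stated in full; the proofs are below) =====
def Claim_equal_yosys_quote_arg_py : Prop := ∀ (arg : String), Dom_yosys_quote_arg_py arg → Spec_yosys_quote_arg_py arg (yosys_quote_arg_py arg)

-- ===== LEMMAS AND PROOFS =====

-- B's fold computes (trigger flag, list of escaped pieces).
theorem foldB_eq (l : List Char) (b : Bool) (acc : List (List Char)) :
    l.foldl (fun (st : Bool × List (List Char)) ch =>
        (st.1 || decide (ch ∈ pvTrig), st.2 ++ [pvPiece ch])) (b, acc)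
      = (b || l.any (fun c => decide (c ∈ pvTrig)), acc ++ l.map pvPiece) := by
  induction l generalizing b acc with
  | nil => simp
  | cons c t ih => simp [ih, Bool.or_assoc]

-- a singleton list is an infix iff its element is a member
theorem singleton_infix_iff (c : Char) (l : List Char) : [c] <:+: l ↔ c ∈ l := by
  constructor
  · rintro ⟨s, t, h⟩; subst h; simp
  · intro h
    obtain ⟨s, t, h⟩ := List.append_of_mem h
    exact ⟨s, t, by simp [h]⟩

-- replace with a single-char pattern is a per-char flatMap
theorem replace_go_single (o : Char) (nw : List Char) :
    ∀ (fuel : Nat) (l : List Char) (acc : List Char), l.length ≤ fuel →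
      PySem.Chars.replace.go [o] nw fuel l acc
        = acc.reverse ++ l.flatMap (fun c => if c = o then nw else [c]) := by
  intro fuel
  induction fuel with
  | zero =>
    intro l acc h
    have : l = [] := List.eq_nil_of_length_eq_zero (Nat.le_zero.mp h)
    subst this; simp [PySem.Chars.replace.go]
  | succ n ih =>
    intro l acc h
    cases l with
    | nil => simp [PySem.Chars.replace.go]
    | cons c t =>
      simp only [PySem.Chars.replace.go]
      by_cases hc : c = o
      · subst hc
        have : List.isPrefixOf [c] (c :: t) = true := by simp [List.isPrefixOf]
        simp only [this, if_pos]
        rw [ih _ _ (by simpa using Nat.le_of_succ_le_succ h)]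
        simp
      · have hpre : List.isPrefixOf [o] (c :: t) = false := by
          simp [List.isPrefixOf]
          intro hco; exact hc hco.symm
        simp only [hpre, Bool.false_eq_true, if_false]
        rw [ih _ _ (by simpa using Nat.le_of_succ_le_succ h)]
        simp [hc]

theorem replace_single (o : Char) (nw : List Char) (l : List Char) :
    PySem.Chars.replace l [o] nw = l.flatMap (fun c => if c = o then nw else [c]) := by
  simp [PySem.Chars.replace, replace_go_single o nw l.length l [] (le_refl _)]

-- the two chained replaces of A produce exactly B's pieces, concatenated
theorem escaped_eq (l : List Char) :
    PySem.Chars.replace (PySem.Chars.replace l ['\\'] ['\\', '\\']) ['"'] ['\\', '"']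
      = (l.map pvPiece).flatten := by
  rw [replace_single, replace_single, List.flatMap_assoc]
  rw [← List.flatMap_def]
  apply List.flatMap_congr
  intro c _
  by_cases h1 : c = '\\'
  · subst h1; simp [pvPiece]
  · by_cases h2 : c = '"'
    · subst h2; simp [pvPiece]
    · simp [pvPiece, h1, h2]

-- ''.join = flatten
theorem join_nil_sep (ps : List (List Char)) : PySem.Chars.join [] ps = ps.flatten := by
  induction ps with
  | nil => simp [PySem.Chars.join, List.intercalate]
  | cons a r ih =>
    cases r with
    | nil => simp [PySem.Chars.join, List.intercalate]
    | cons b r' => rw [PySem.Chars.join_cons_cons, ih]; simp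

-- A's trigger scan agrees with B's per-char flag
theorem trigger_eq (l : List Char) :
    ([' ', '\t', '\n', '\r', ';', '"', '\''].any (fun ch => PySem.Chars.isIn [ch] l))
      = l.any (fun c => decide (c ∈ pvTrig)) := by
  unfold pvTrig
  rw [Bool.eq_iff_iff]
  simp only [List.any_eq_true, PySem.Chars.isIn_iff_infix, singleton_infix_iff, decide_eq_true_eq]
  constructor
  · rintro ⟨a, ha, hm⟩; exact ⟨a, hm, ha⟩
  · rintro ⟨a, ha, hm⟩; exact ⟨a, hm, ha⟩

-- ===== VERDICT (by name: the statement is the Claim_ definition above) =====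
theorem yosys_quote_arg_py_spec : Claim_equal_yosys_quote_arg_py := by
  intro arg _
  show yosys_quote_arg_py arg = yosys_quote_arg_py_alt arg
  unfold yosys_quote_arg_py yosys_quote_arg_py_alt
  simp only [foldB_eq, Bool.false_or, List.nil_append]
  by_cases hlen : (PySem.Str.len arg == 0) = true
  · rw [if_pos hlen, if_pos hlen]
  · rw [if_neg hlen, if_neg hlen]
    rw [trigger_eq arg.toList]
    by_cases hany : (arg.toList.any (fun c => decide (c ∈ pvTrig))) = true
    · rw [if_neg (by simp [hany]), if_neg (by simp [hany]),
        escaped_eq, join_nil_sep]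
    · have hfalse : (arg.toList.any (fun c => decide (c ∈ pvTrig))) = false := by
        simpa using hany
      rw [if_pos (by simp [hfalse]), if_pos hfalse]
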